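-- pv_equiv track=rewrite | github.com/NinjaDoge000/DS-ALGO-101 | DifferenceArray/Python/DifferenceArray.py | meetRequirement
-- ===== SOURCE A (Python) =====
-- from typing import List
--
-- def meetRequirement(n: int, lights: List[List[int]], requirement: List[int]) -> int:
--
--
--     delta = [0] * (n + 1)
--     res = 0
--     for position, coverage in lights:
--         right_range = min(n - 1, position + coverage)
--         left_range = max(0, position - coverage)
--
--         # difference array
--         delta[left_range]  += 1
--         delta[right_range + 1] -=1
--
--     # prefix sum
--     actual_lighting = 0
--     for i in range(n):
--
--         actual_lighting += delta[i]
--         if actual_lighting >= requirement[i]: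
--             res += 1
--
--     return res
-- ===== SOURCE B (Python) =====
-- from typing import List
--
-- def meetRequirement(n: int, lights: List[List[int]], requirement: List[int]) -> int:
--     events = []
--     for position, coverage in lights:
--         left_range = max(0, position - coverage)
--         right_range = min(n - 1, position + coverage)
--         events.append((left_range, 1))
--         events.append((right_range + 1, -1))
--     events.sort()
--     res = 0
--     cover = 0
--     j = 0
--     for i in range(n):
--         while j < len(events) and events[j][0] <= i:
--             cover += events[j][1]
--             j += 1
--         if cover >= requirement[i]:
--             res += 1
--     return res
-- ===== Notes on version B (the rewrite author's own statement) =====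
-- stated objective: alternative
-- what changed: Replaces the position-indexed difference array and its prefix-sum pass with a sorted event list ((left,+1),(right+1,-1)) swept by a pointer and a running coverage counter alongside the position loop.
-- outside the precondition, e.g. on meetRequirement(1, [[-2, 0]], [1]): A returns 1, B returns 0
import Mathlib
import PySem

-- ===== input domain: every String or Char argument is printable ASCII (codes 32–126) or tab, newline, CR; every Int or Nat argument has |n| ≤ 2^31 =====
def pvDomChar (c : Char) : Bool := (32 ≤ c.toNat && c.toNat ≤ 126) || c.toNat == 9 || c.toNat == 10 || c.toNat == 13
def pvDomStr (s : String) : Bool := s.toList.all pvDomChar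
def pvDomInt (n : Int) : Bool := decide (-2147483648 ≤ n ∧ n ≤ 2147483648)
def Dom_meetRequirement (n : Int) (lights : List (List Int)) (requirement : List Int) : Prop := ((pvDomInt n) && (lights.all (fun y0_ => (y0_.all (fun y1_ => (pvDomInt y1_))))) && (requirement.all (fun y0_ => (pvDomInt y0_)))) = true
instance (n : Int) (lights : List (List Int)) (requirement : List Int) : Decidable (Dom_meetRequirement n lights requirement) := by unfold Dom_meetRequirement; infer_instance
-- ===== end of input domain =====

-- B replaces A's position-indexed difference array + prefix-sum pass by a sorted event list swept
-- with a pointer and a running coverage counter (a different decomposition, not faster).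

-- ===== PORT A =====
-- body of A's first loop: the two difference-array updates for one light
def deltaStep (n : Int) (d : List Int) (light : List Int) : List Int :=
  match light with
  | [position, coverage] =>
    let right_range := min (n - 1) (position + coverage)
    let left_range := max 0 (position - coverage)
    let d1 := PySem.List.pySetD d left_range (PySem.List.pyGetD d left_range 0 + 1)
    PySem.List.pySetD d1 (right_range + 1) (PySem.List.pyGetD d1 (right_range + 1) 0 - 1)
  | _ => d   -- unpacking raises in Python: outside Pre_

-- body of A's second loop: (actual_lighting, res) updated at position i
def countStepA (delta requirement : List Int) (s : Int × Int) (i : Int) : Int × Int :=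
  let lighting := s.1 + PySem.List.pyGetD delta i 0
  (lighting, if PySem.List.pyGetD requirement i 0 ≤ lighting then s.2 + 1 else s.2)

def meetRequirement (n : Int) (lights : List (List Int)) (requirement : List Int) : Int :=
  let delta := lights.foldl (deltaStep n) (List.replicate (n + 1).toNat 0)
  ((PySem.List.pyRange 0 n 1).foldl (countStepA delta requirement) (0, 0)).2

-- ===== PORT B =====
-- body of B's first loop: append the two events of one light
def evStep (n : Int) (ev : List (Int × Int)) (light : List Int) : List (Int × Int) :=
  match light with
  | [position, coverage] =>
    let left_range := max 0 (position - coverage)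
    let right_range := min (n - 1) (position + coverage)
    (ev ++ [(left_range, 1)]) ++ [(right_range + 1, -1)]
  | _ => ev   -- unpacking raises in Python: outside Pre_

-- B's inner 'while' loop: consume the pending events with position ≤ i into the running coverage
def altWhile (i : Int) : List (Int × Int) → Int → (List (Int × Int) × Int)
  | [], cover => ([], cover)
  | e :: rest, cover => if e.1 ≤ i then altWhile i rest (cover + e.2) else (e :: rest, cover)

-- body of B's second loop: state (pending events, cover, res) at position i
def countStepB (requirement : List Int) (s : List (Int × Int) × Int × Int) (i : Int) :
    List (Int × Int) × Int × Int :=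
  let rc := altWhile i s.1 s.2.1
  (rc.1, rc.2, if PySem.List.pyGetD requirement i 0 ≤ rc.2 then s.2.2 + 1 else s.2.2)

def meetRequirement_alt (n : Int) (lights : List (List Int)) (requirement : List Int) : Int :=
  let events := lights.foldl (evStep n) []
  let sortedEvents := PySem.List.sorted2 events (fun e => e.1) (fun e => e.2) false
  ((PySem.List.pyRange 0 n 1).foldl (countStepB requirement) (sortedEvents, 0, 0)).2.2

-- ===== PRECONDITION & SPEC =====
-- Pre_ excludes the inputs on which A raises IndexError/ValueError (a light row not of length 2;
-- max(0,position-coverage) > n; position+coverage < -n-2; requirement shorter than n; n < 0 with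
-- lights present) and, in addition, lights whose covered range lies entirely left of position 0
-- (position+coverage ≤ -2): those are degenerate inputs outside the task's natural domain, on which
-- A's update delta[right_range+1] lands through Python's end-relative negative indexing.
def Pre_meetRequirement (n : Int) (lights : List (List Int)) (requirement : List Int) : Prop :=
  (∀ l ∈ lights, l.length = 2 ∧ l.getD 0 0 - l.getD 1 0 ≤ n ∧ -1 ≤ l.getD 0 0 + l.getD 1 0) ∧
  n ≤ (requirement.length : Int) ∧ (n < 0 → lights = [])
instance (n : Int) (lights : List (List Int)) (requirement : List Int) : Decidable (Pre_meetRequirement n lights requirement) := by unfold Pre_meetRequirement; infer_instance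

def pvWitness_meetRequirement : Int × List (List Int) × List Int := (2, [[0, 1]], [1, 1])

def Spec_meetRequirement (n : Int) (lights : List (List Int)) (requirement : List Int) (out : Int) : Prop := out = meetRequirement_alt n lights requirement
instance (n : Int) (lights : List (List Int)) (requirement : List Int) (out : Int) : Decidable (Spec_meetRequirement n lights requirement out) := by unfold Spec_meetRequirement; infer_instance

-- ===== CLAIM (what is proved, stated in full; the proofs are below) =====
def Claim_equal_meetRequirement : Prop := ∀ (n : Int) (lights : List (List Int)) (requirement : List Int), Dom_meetRequirement n lights requirement → Pre_meetRequirement n lights requirement → Spec_meetRequirement n lights requirement (meetRequirement n lights requirement)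


-- ===== LEMMAS AND PROOFS =====

-- per-light characteristics: clamped left endpoint and (right endpoint + 1)
def lightL (l : List Int) : Int := max 0 (l.getD 0 0 - l.getD 1 0)
def lightR1 (n : Int) (l : List Int) : Int := min (n - 1) (l.getD 0 0 + l.getD 1 0) + 1
-- contribution of one light to the coverage at position i / to delta[j]
def contrib (n i : Int) (l : List Int) : Int :=
  (if lightL l ≤ i then 1 else 0) - (if lightR1 n l ≤ i then 1 else 0)
def contribD (n j : Int) (l : List Int) : Int :=
  (if lightL l = j then 1 else 0) - (if lightR1 n l = j then 1 else 0)
-- total coverage at position i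
def covC (n : Int) (lights : List (List Int)) (i : Int) : Int := (lights.map (contrib n i)).sum
-- the count both loops compute, as a recursion over the first m positions
def cntShared (n : Int) (lights : List (List Int)) (requirement : List Int) : Nat → Int
  | 0 => 0
  | m + 1 => cntShared n lights requirement m +
      (if PySem.List.pyGetD requirement (m : Int) 0 ≤ covC n lights (m : Int) then 1 else 0)

-- the per-light condition Pre_ states
def GoodLight (n : Int) (l : List Int) : Prop :=
  l.length = 2 ∧ l.getD 0 0 - l.getD 1 0 ≤ n ∧ -1 ≤ l.getD 0 0 + l.getD 1 0

theorem lightL_bounds (n : Int) (hn : 0 ≤ n) (l : List Int) (h : GoodLight n l) :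
    0 ≤ lightL l ∧ lightL l ≤ n := by
  unfold GoodLight at h; unfold lightL; omega

theorem lightR1_bounds (n : Int) (l : List Int) (hn : 0 ≤ n) (h : GoodLight n l) :
    0 ≤ lightR1 n l ∧ lightR1 n l ≤ n := by
  unfold GoodLight at h; unfold lightR1; omega

theorem len_deltaStep (n : Int) (d : List Int) (l : List Int) :
    (deltaStep n d l).length = d.length := by
  unfold deltaStep
  rcases l with _ | ⟨p, _ | ⟨c, _ | t⟩⟩ <;> simp [PySem.List.length_pySetD]

theorem set2_getD (d : List Int) (L R j : Nat) (hL : L < d.length) (hR : R < d.length)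
    (hj : j < d.length) :
    PySem.List.pyGetD
        (PySem.List.pySetD (PySem.List.pySetD d (L : Int) (PySem.List.pyGetD d (L : Int) 0 + 1))
          (R : Int)
          (PySem.List.pyGetD
            (PySem.List.pySetD d (L : Int) (PySem.List.pyGetD d (L : Int) 0 + 1)) (R : Int) 0 - 1))
        (j : Int) 0 =
      PySem.List.pyGetD d (j : Int) 0 +
        ((if (L : Int) = (j : Int) then 1 else 0) - (if (R : Int) = (j : Int) then 1 else 0)) := by
  simp only [PySem.List.pySetD_natCast, PySem.List.pyGetD_natCast]
  simp only [List.getD_eq_getElem?_getD, List.getElem?_set, Nat.cast_inj]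
  by_cases hRj : R = j
  · subst hRj
    by_cases hLj : L = R
    · subst hLj
      simp [hL]
      try ring
    · simp [hLj, hR]
      ring
  · by_cases hLj : L = j
    · subst hLj
      simp [hRj, hL]
      try ring
    · simp [hRj, hLj]
      try ring

theorem deltaStep_getD (n : Int) (hn : 0 ≤ n) (d l : List Int) (hl : GoodLight n l)
    (hd : (d.length : Int) = n + 1) (j : Int) (hj0 : 0 ≤ j) (hjn : j ≤ n) :
    PySem.List.pyGetD (deltaStep n d l) j 0 = PySem.List.pyGetD d j 0 + contribD n j l := by
  obtain ⟨hlen, hb1, hb2⟩ := hl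
  rcases l with _ | ⟨p, _ | ⟨c, _ | t⟩⟩ <;> simp at hlen
  simp only [List.getD_cons_zero, List.getD_cons_succ] at hb1 hb2
  have hred : deltaStep n d [p, c] =
      PySem.List.pySetD
        (PySem.List.pySetD d (max 0 (p - c)) (PySem.List.pyGetD d (max 0 (p - c)) 0 + 1))
        (min (n - 1) (p + c) + 1)
        (PySem.List.pyGetD
          (PySem.List.pySetD d (max 0 (p - c)) (PySem.List.pyGetD d (max 0 (p - c)) 0 + 1))
          (min (n - 1) (p + c) + 1) 0 - 1) := rfl
  have hCD : contribD n j [p, c] =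
      (if max 0 (p - c) = j then 1 else 0) - (if min (n - 1) (p + c) + 1 = j then 1 else 0) := by
    simp [contribD, lightL, lightR1]
  rw [hred, hCD]
  obtain ⟨Ln, hLn⟩ : ∃ k : Nat, max 0 (p - c) = (k : Int) := ⟨(max 0 (p - c)).toNat, by omega⟩
  obtain ⟨Rn, hRn⟩ : ∃ k : Nat, min (n - 1) (p + c) + 1 = (k : Int) :=
    ⟨(min (n - 1) (p + c) + 1).toNat, by omega⟩
  obtain ⟨jn, rfl⟩ : ∃ k : Nat, j = (k : Int) := ⟨j.toNat, by omega⟩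
  rw [hLn, hRn]
  exact set2_getD d Ln Rn jn (by omega) (by omega) (by omega)

theorem fold_delta_getD (n : Int) (hn : 0 ≤ n) (lights : List (List Int))
    (hg : ∀ l ∈ lights, GoodLight n l) (d : List Int) (hd : (d.length : Int) = n + 1)
    (j : Int) (hj0 : 0 ≤ j) (hjn : j ≤ n) :
    PySem.List.pyGetD (lights.foldl (deltaStep n) d) j 0 =
      PySem.List.pyGetD d j 0 + (lights.map (contribD n j)).sum := by
  induction lights generalizing d with
  | nil => simp
  | cons l t ih =>
    simp only [List.foldl_cons, List.map_cons, List.sum_cons]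
    rw [ih (fun x hx => hg x (by simp [hx])) _ (by rw [len_deltaStep]; exact hd)]
    rw [deltaStep_getD n hn d l (hg l (by simp)) hd j hj0 hjn]
    ring

theorem delta_getD (n : Int) (hn : 0 ≤ n) (lights : List (List Int))
    (hg : ∀ l ∈ lights, GoodLight n l) (j : Int) (hj0 : 0 ≤ j) (hjn : j ≤ n) :
    PySem.List.pyGetD (lights.foldl (deltaStep n) (List.replicate (n + 1).toNat 0)) j 0 =
      (lights.map (contribD n j)).sum := by
  rw [fold_delta_getD n hn lights hg _ (by simp; omega) j hj0 hjn]
  rw [PySem.List.pyGetD_eq_getElem _ _ hj0 (by simp; omega)]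
  simp

theorem contrib_step (n m : Int) (l : List Int) :
    contrib n m l = contrib n (m - 1) l + contribD n m l := by
  unfold contrib contribD; split_ifs <;> omega

theorem covC_step (n : Int) (lights : List (List Int)) (m : Int) :
    covC n lights m = covC n lights (m - 1) + (lights.map (contribD n m)).sum := by
  unfold covC
  rw [← PySem.List.sum_map_add_int]
  congr 1
  exact List.map_congr_left (fun l _ => contrib_step n m l)

theorem covC_neg_one (n : Int) (hn : 0 ≤ n) (lights : List (List Int))
    (hg : ∀ l ∈ lights, GoodLight n l) : covC n lights (-1) = 0 := by
  unfold covC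
  apply List.sum_eq_zero
  intro x hx
  simp only [List.mem_map] at hx
  obtain ⟨l, hl, rfl⟩ := hx
  have h1 := lightL_bounds n hn l (hg l hl)
  have h2 := lightR1_bounds n l hn (hg l hl)
  unfold contrib
  rw [if_neg (by omega), if_neg (by omega)]
  ring

-- A's second loop: invariant over the first m positions
theorem loopA_inv (n : Int) (hn : 0 ≤ n) (lights : List (List Int))
    (hg : ∀ l ∈ lights, GoodLight n l) (requirement : List Int) :
    ∀ m : Nat, (m : Int) ≤ n →
      (PySem.List.pyRange 0 (m : Int) 1).foldl
          (countStepA (lights.foldl (deltaStep n) (List.replicate (n + 1).toNat 0)) requirement)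
          (0, 0) =
        (covC n lights ((m : Int) - 1), cntShared n lights requirement m) := by
  intro m
  induction m with
  | zero =>
    intro _
    rw [show ((0 : Nat) : Int) = 0 by rfl, PySem.List.pyRange_one_eq_nil (by omega)]
    simp [cntShared, covC_neg_one n hn lights hg]
  | succ m ih =>
    intro hm
    have hm' : (m : Int) ≤ n := by push_cast at hm ⊢; omega
    rw [show ((m + 1 : Nat) : Int) = (m : Int) + 1 by push_cast; ring]
    rw [PySem.List.pyRange_one_succ_right (by positivity)]
    rw [List.foldl_append, ih hm']
    simp only [List.foldl_cons, List.foldl_nil]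
    unfold countStepA
    rw [delta_getD n hn lights hg m (by positivity) (by push_cast at hm; omega)]
    rw [← covC_step n lights m]
    simp only [cntShared, Prod.mk.injEq]
    refine ⟨by ring_nf, ?_⟩
    split_ifs <;> ring

-- B side: sortedness of the event list
theorem insertBy_pairwise_fst (x : Int × Int) (ys : List (Int × Int))
    (h : ys.Pairwise (fun a b => a.1 ≤ b.1)) :
    (PySem.List.insertBy
        (fun a b => decide (a.1 < b.1) || !decide (b.1 < a.1) && decide (a.2 < b.2)) x ys).Pairwise
      (fun a b => a.1 ≤ b.1) := by
  induction ys with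
  | nil => simp [PySem.List.insertBy]
  | cons y ys ih =>
    rw [List.pairwise_cons] at h
    obtain ⟨hy, hys⟩ := h
    have hcons : PySem.List.insertBy
        (fun a b => decide (a.1 < b.1) || !decide (b.1 < a.1) && decide (a.2 < b.2)) x (y :: ys) =
        if (decide (x.1 < y.1) || !decide (y.1 < x.1) && decide (x.2 < y.2)) then x :: y :: ys
        else y :: PySem.List.insertBy
          (fun a b => decide (a.1 < b.1) || !decide (b.1 < a.1) && decide (a.2 < b.2)) x ys := rfl
    rw [hcons]
    split_ifs with hbef
    · simp only [Bool.or_eq_true, Bool.and_eq_true, decide_eq_true_eq, Bool.not_eq_true',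
        decide_eq_false_iff_not] at hbef
      rw [List.pairwise_cons]
      refine ⟨?_, List.pairwise_cons.mpr ⟨hy, hys⟩⟩
      intro z hz
      rw [List.mem_cons] at hz
      rcases hz with rfl | hz
      · omega
      · have := hy z hz; omega
    · simp only [Bool.or_eq_true, Bool.and_eq_true, decide_eq_true_eq, Bool.not_eq_true',
        decide_eq_false_iff_not, not_or, not_and] at hbef
      rw [List.pairwise_cons]
      refine ⟨?_, ih hys⟩
      intro z hz
      rw [PySem.List.mem_insertBy] at hz
      rcases hz with rfl | hz
      · omega
      · exact hy z hz

theorem sorted2_pairwise_fst (xs : List (Int × Int)) :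
    (PySem.List.sorted2 xs (fun e => e.1) (fun e => e.2) false).Pairwise
      (fun a b => a.1 ≤ b.1) := by
  unfold PySem.List.sorted2
  simp only [if_neg (by decide : ¬ (false = true))]
  suffices h : ∀ (l : List (Int × Int)) (acc : List (Int × Int)),
      acc.Pairwise (fun a b => a.1 ≤ b.1) →
      (l.foldl (fun acc x => PySem.List.insertBy
        (fun a b => decide (a.1 < b.1) || !decide (b.1 < a.1) && decide (a.2 < b.2)) x acc) acc).Pairwise
        (fun a b => a.1 ≤ b.1) by
    exact h xs [] (by simp)
  intro l
  induction l with
  | nil => intro acc h; simpa using h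
  | cons x t ih =>
    intro acc h
    exact ih _ (insertBy_pairwise_fst x acc h)

-- B's inner while loop on a fst-sorted pending list
theorem altWhile_spec (i : Int) :
    ∀ (ev : List (Int × Int)) (cover : Int), ev.Pairwise (fun a b => a.1 ≤ b.1) →
      altWhile i ev cover =
        (ev.dropWhile (fun e => decide (e.1 ≤ i)),
         cover + ((ev.takeWhile (fun e => decide (e.1 ≤ i))).map (·.2)).sum) := by
  intro ev
  induction ev with
  | nil => intro cover _; simp [altWhile]
  | cons e rest ih =>
    intro cover h
    rw [List.pairwise_cons] at h
    by_cases he : e.1 ≤ i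
    · rw [altWhile, if_pos he, ih _ h.2]
      simp [he]
      ring
    · rw [altWhile, if_neg he]
      simp [he]

-- on a fst-sorted list, takeWhile/dropWhile of a downward-closed test are filters
theorem sorted_takeWhile_eq_filter (i : Int) :
    ∀ ev : List (Int × Int), ev.Pairwise (fun a b => a.1 ≤ b.1) →
      ev.takeWhile (fun e => decide (e.1 ≤ i)) = ev.filter (fun e => decide (e.1 ≤ i)) := by
  intro ev
  induction ev with
  | nil => intro _; rfl
  | cons e rest ih =>
    intro h
    rw [List.pairwise_cons] at h
    by_cases he : e.1 ≤ i
    · simp [he, ih h.2]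
    · simp only [List.takeWhile_cons, List.filter_cons]
      rw [decide_eq_false (by exact he)]
      simp only [Bool.false_eq_true, if_false]
      symm
      rw [List.filter_eq_nil_iff]
      intro a ha
      have := h.1 a ha
      simp; omega

theorem sorted_dropWhile_eq_filter (i : Int) :
    ∀ ev : List (Int × Int), ev.Pairwise (fun a b => a.1 ≤ b.1) →
      ev.dropWhile (fun e => decide (e.1 ≤ i)) = ev.filter (fun e => decide (¬ e.1 ≤ i)) := by
  intro ev
  induction ev with
  | nil => intro _; rfl
  | cons e rest ih =>
    intro h
    rw [List.pairwise_cons] at h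
    by_cases he : e.1 ≤ i
    · simp [he, ih h.2]
    · simp only [List.dropWhile_cons, List.filter_cons]
      rw [decide_eq_false (by exact he)]
      simp only [Bool.false_eq_true, if_false]
      rw [decide_eq_true (by exact he)]
      simp only [if_true]
      congr 1
      symm
      rw [List.filter_eq_self]
      intro a ha
      have := h.1 a ha
      simp; omega

-- split a filtered sum along a weaker predicate
theorem sum_filter_split (f : Int × Int → Int) (p q : Int × Int → Bool)
    (himp : ∀ e, p e = true → q e = true) :
    ∀ l : List (Int × Int),
      ((l.filter q).map f).sum =
        ((l.filter p).map f).sum + ((l.filter (fun e => q e && !p e)).map f).sum := by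
  intro l
  induction l with
  | nil => simp
  | cons e t ih =>
    simp only [List.filter_cons]
    by_cases hp : p e = true
    · rw [hp, himp e hp]
      simp [ih]; ring
    · rw [Bool.not_eq_true] at hp
      rw [hp]
      by_cases hq : q e = true
      · rw [hq]
        simp [ih]; ring
      · rw [Bool.not_eq_true] at hq
        rw [hq]
        simp [ih]

-- coverage sum read off the raw event list
theorem events_eq_flatMap (n : Int) (lights : List (List Int)) :
    lights.foldl (evStep n) [] =
      lights.flatMap (fun l =>
        match l with
        | [position, coverage] =>
            [(max 0 (position - coverage), 1), (min (n - 1) (position + coverage) + 1, -1)]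
        | _ => []) := by
  rw [PySem.List.foldl_congr_mem lights (evStep n)
    (fun acc l => acc ++ match l with
      | [position, coverage] =>
          [(max 0 (position - coverage), (1 : Int)), (min (n - 1) (position + coverage) + 1, -1)]
      | _ => []) []
    (by
      intro acc l _
      unfold evStep
      rcases l with _ | ⟨p, _ | ⟨c, _ | t⟩⟩ <;> simp)]
  rw [PySem.List.foldl_append_eq_flatMap]
  simp

theorem filtered_flatMap_sum (n i : Int) :
    ∀ lights : List (List Int), (∀ l ∈ lights, GoodLight n l) →
      (((lights.flatMap (fun l =>
          match l with
          | [position, coverage] =>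
              [(max 0 (position - coverage), (1 : Int)),
               (min (n - 1) (position + coverage) + 1, -1)]
          | _ => [])).filter (fun e => decide (e.1 ≤ i))).map (·.2)).sum = covC n lights i := by
  intro lights
  induction lights with
  | nil => intro _; simp [covC]
  | cons l t ih =>
    intro hg
    simp only [List.flatMap_cons, List.filter_append, List.map_append, List.sum_append]
    rw [ih (fun x hx => hg x (by simp [hx]))]
    have hgl := hg l (by simp)
    obtain ⟨hlen, _, _⟩ := hgl
    rcases l with _ | ⟨p, _ | ⟨c, _ | t'⟩⟩ <;> simp at hlen
    show _ + covC n t i = covC n ([p, c] :: t) i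
    unfold covC
    simp only [List.map_cons, List.sum_cons]
    have hL : lightL [p, c] = max 0 (p - c) := by simp [lightL]
    have hR : lightR1 n [p, c] = min (n - 1) (p + c) + 1 := by simp [lightR1]
    unfold contrib
    rw [hL, hR]
    by_cases h1 : max 0 (p - c) ≤ i <;> by_cases h2 : min (n - 1) (p + c) + 1 ≤ i <;>
      simp [h1, h2]

theorem filtered_event_sum (n : Int) (lights : List (List Int))
    (hg : ∀ l ∈ lights, GoodLight n l) (i : Int) :
    (((lights.foldl (evStep n) []).filter (fun e => decide (e.1 ≤ i))).map (·.2)).sum =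
      covC n lights i := by
  rw [events_eq_flatMap]
  exact filtered_flatMap_sum n i lights hg

-- the running coverage of the sorted sweep, via permutation invariance of the filtered sum
theorem sortedEvents_cov (n : Int) (lights : List (List Int))
    (hg : ∀ l ∈ lights, GoodLight n l) (i : Int) :
    ((((PySem.List.sorted2 (lights.foldl (evStep n) []) (fun e => e.1) (fun e => e.2)
        false)).filter (fun e => decide (e.1 ≤ i))).map (·.2)).sum = covC n lights i := by
  rw [← filtered_event_sum n lights hg i]
  have hperm := PySem.List.sorted2_perm (lights.foldl (evStep n) []) (fun e => e.1) (fun e => e.2) false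
  exact List.Perm.sum_eq (List.Perm.map _ (List.Perm.filter _ hperm))

theorem event_fst_nonneg (n : Int) (hn : 0 ≤ n) (lights : List (List Int))
    (hg : ∀ l ∈ lights, GoodLight n l) :
    ∀ e ∈ PySem.List.sorted2 (lights.foldl (evStep n) []) (fun e => e.1) (fun e => e.2) false,
      0 ≤ e.1 := by
  intro e he
  have hperm := PySem.List.sorted2_perm (lights.foldl (evStep n) []) (fun e => e.1) (fun e => e.2) false
  have he' : e ∈ lights.foldl (evStep n) [] := hperm.mem_iff.mp he
  rw [events_eq_flatMap] at he'
  simp only [List.mem_flatMap] at he'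
  obtain ⟨l, hl, hel⟩ := he'
  have hgl := hg l hl
  obtain ⟨hlen, hb1, hb2⟩ := hgl
  rcases l with _ | ⟨p, _ | ⟨c, _ | t'⟩⟩ <;> simp at hlen
  simp only [List.getD_cons_zero, List.getD_cons_succ] at hb1 hb2
  rw [List.mem_cons, List.mem_cons] at hel
  rcases hel with rfl | rfl | h
  · simp
    try omega
  · simp
    try omega
  · simp at h

-- B's second loop: invariant over the first m positions
theorem loopB_inv (n : Int) (hn : 0 ≤ n) (lights : List (List Int))
    (hg : ∀ l ∈ lights, GoodLight n l) (requirement : List Int) :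
    ∀ m : Nat, (m : Int) ≤ n →
      (PySem.List.pyRange 0 (m : Int) 1).foldl (countStepB requirement)
          (PySem.List.sorted2 (lights.foldl (evStep n) []) (fun e => e.1) (fun e => e.2) false,
            0, 0) =
        ((PySem.List.sorted2 (lights.foldl (evStep n) []) (fun e => e.1) (fun e => e.2)
            false).filter (fun e => decide (¬ e.1 ≤ (m : Int) - 1)),
          covC n lights ((m : Int) - 1), cntShared n lights requirement m) := by
  have hpw := sorted2_pairwise_fst (lights.foldl (evStep n) [])
  set ev := PySem.List.sorted2 (lights.foldl (evStep n) []) (fun e => e.1) (fun e => e.2) false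
    with hev
  intro m
  induction m with
  | zero =>
    intro _
    rw [show ((0 : Nat) : Int) = 0 by rfl, PySem.List.pyRange_one_eq_nil (by omega),
      show ((0 : Int) - 1) = (-1 : Int) by ring]
    simp only [List.foldl_nil, cntShared, Prod.mk.injEq]
    refine ⟨?_, ?_, ?_⟩
    · symm
      rw [List.filter_eq_self]
      intro a ha
      rw [hev] at ha
      have := event_fst_nonneg n hn lights hg a ha
      simp; omega
    · exact (covC_neg_one n hn lights hg).symm
    · trivial
  | succ m ih =>
    intro hm
    have hm' : (m : Int) ≤ n := by push_cast at hm ⊢; omega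
    rw [show ((m + 1 : Nat) : Int) = (m : Int) + 1 by push_cast; ring]
    rw [PySem.List.pyRange_one_succ_right (by positivity)]
    rw [List.foldl_append, ih hm']
    simp only [List.foldl_cons, List.foldl_nil]
    unfold countStepB
    have hpwf : (ev.filter (fun e => decide (¬ e.1 ≤ (m : Int) - 1))).Pairwise
        (fun a b => a.1 ≤ b.1) := List.Pairwise.sublist List.filter_sublist hpw
    rw [altWhile_spec (m : Int) _ _ hpwf]
    rw [sorted_takeWhile_eq_filter _ _ hpwf, sorted_dropWhile_eq_filter _ _ hpwf]
    rw [List.filter_filter, List.filter_filter]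
    rw [show ((m : Int) + 1 - 1) = (m : Int) by ring]
    have h3 : (ev.filter (fun e => decide (e.1 ≤ (m : Int)) && decide (¬ e.1 ≤ (m : Int) - 1)))
        = (ev.filter (fun e => decide (e.1 ≤ (m : Int)) && !decide (e.1 ≤ (m : Int) - 1))) := by
      apply List.filter_congr
      intro e _
      by_cases h : e.1 ≤ (m : Int) - 1 <;> simp [h]
    have hstep : covC n lights ((m : Int) - 1) +
        ((ev.filter (fun e => decide (e.1 ≤ (m : Int)) && decide (¬ e.1 ≤ (m : Int) - 1))).map
          (·.2)).sum = covC n lights (m : Int) := by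
      have hsplit := sum_filter_split (·.2) (fun e => decide (e.1 ≤ (m : Int) - 1))
        (fun e => decide (e.1 ≤ (m : Int))) (by intro e h; simp at h ⊢; omega) ev
      have h1 := sortedEvents_cov n lights hg (m : Int)
      have h2 := sortedEvents_cov n lights hg ((m : Int) - 1)
      rw [← hev] at h1 h2
      rw [h1, h2] at hsplit
      rw [h3]
      omega
    simp only [Prod.mk.injEq]
    refine ⟨?_, hstep, ?_⟩
    · apply List.filter_congr
      intro e _
      by_cases hc : e.1 ≤ (m : Int)
      · have hb : decide (¬ e.1 ≤ (m : Int)) = false := by simp [hc]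
        rw [hb]
        simp
      · have hb : decide (¬ e.1 ≤ (m : Int)) = true := by simp [hc]
        have hb2 : decide (¬ e.1 ≤ (m : Int) - 1) = true := by simp; omega
        rw [hb, hb2]
        rfl
    · rw [hstep]
      simp only [cntShared]
      split_ifs <;> omega

-- empty-range evaluation of both ports
theorem meetRequirement_neg (n : Int) (hn : n < 0) (requirement : List Int) :
    meetRequirement n [] requirement = 0 ∧ meetRequirement_alt n [] requirement = 0 := by
  constructor <;>
    simp [meetRequirement, meetRequirement_alt,
      PySem.List.pyRange_one_eq_nil (show n ≤ (0 : Int) by omega)]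

-- ===== VERDICT (by name: the statement is the Claim_ definition above) =====
theorem meetRequirement_spec : Claim_equal_meetRequirement := by
  intro n lights requirement _ hpre
  obtain ⟨hg', hreq, hneg⟩ := hpre
  unfold Spec_meetRequirement
  by_cases hn : 0 ≤ n
  · have hg : ∀ l ∈ lights, GoodLight n l := hg'
    have hnn : ((n.toNat : Nat) : Int) = n := Int.toNat_of_nonneg hn
    have hA := loopA_inv n hn lights hg requirement n.toNat (by omega)
    have hB := loopB_inv n hn lights hg requirement n.toNat (by omega)
    have hrange : PySem.List.pyRange 0 n 1 = PySem.List.pyRange 0 ((n.toNat : Nat) : Int) 1 := by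
      rw [hnn]
    simp only [meetRequirement, meetRequirement_alt]
    rw [hrange, hA, hB]
  · have hl : lights = [] := hneg (by omega)
    subst hl
    have h := meetRequirement_neg n (by omega) requirement
    rw [h.1, h.2]
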